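-- pv_equiv track=rewrite | github.com/jiwnee252/TIL | python/python-algorithm/swea/10966_go_swimming.py | bfs
-- ===== SOURCE A (Python) =====
-- from collections import deque   # 덱쓰면 런타임 에러남..
--
-- dx = [-1, 1, 0, 0]
--
-- dy = [0, 0, -1, 1]
--
-- def bfs(arr, N, M):
--
--     dist = [[-1] * M for _ in range(N)]             # 거리
--     queue = deque()
--     # queue = []
--     for i in range(N):
--         for j in range(M):
--             if arr[i][j] == 'W':  # W기준으로
--                 queue.append([i, j])
--                 dist[i][j] = 0  # 물이면 거리 0으로 일단해줌
--
--     while queue: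
--         x, y = queue.popleft()
--         # x, y = queue.pop(0)
--         for d in range(4):
--             nx = x + dx[d]
--             ny = y + dy[d]
--             if 0 <= nx < N and 0 <= ny < M and dist[nx][ny] == -1:   # 범위안에 잇고 아직 방문x
--                 dist[nx][ny] = dist[x][y] + 1   # 거리 +1해줌
--                 queue.append([nx, ny])
--
--     return dist
-- ===== SOURCE B (Python) =====
-- def bfs(arr, N, M):
--     ws = [(i, j) for i in range(N) for j in range(M) if arr[i][j] == 'W']
--     if not ws:
--         return [[-1] * M for _ in range(N)]
--     return [[min(abs(i - a) + abs(j - b) for a, b in ws) for j in range(M)]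
--             for i in range(N)]
-- ===== Notes on version B (the rewrite author's own statement) =====
-- stated objective: simpler
-- what changed: Replaces the mutable-grid queue BFS by a direct per-cell closed form: with no obstacles the BFS distance is the minimum Manhattan distance to any 'W' cell, so B collects the water cells once and computes min(|i-a|+|j-b|) per cell (all -1 when there is no water).
import Mathlib
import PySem

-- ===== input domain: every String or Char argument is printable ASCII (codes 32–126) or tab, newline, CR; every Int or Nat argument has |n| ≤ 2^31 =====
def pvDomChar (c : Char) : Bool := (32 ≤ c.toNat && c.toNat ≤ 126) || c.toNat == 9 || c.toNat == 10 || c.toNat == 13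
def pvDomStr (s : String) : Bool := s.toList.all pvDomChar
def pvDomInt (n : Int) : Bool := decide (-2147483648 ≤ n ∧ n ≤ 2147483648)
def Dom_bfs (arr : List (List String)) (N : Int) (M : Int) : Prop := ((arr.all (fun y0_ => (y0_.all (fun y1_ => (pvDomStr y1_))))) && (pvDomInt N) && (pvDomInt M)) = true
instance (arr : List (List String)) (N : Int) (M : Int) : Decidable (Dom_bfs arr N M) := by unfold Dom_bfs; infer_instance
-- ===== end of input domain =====

-- B replaces A's queue BFS by the per-cell closed form (min Manhattan distance to a 'W' cell),
-- which is exact because the grid has no obstacles; objective: simpler (not faster).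

-- ===== PORT A =====
-- arr[i][j] (in-range under Pre_bfs; the default "" is never hit on admitted inputs)
def cellStr (arr : List (List String)) (i j : Int) : String :=
  PySem.List.pyGetD (PySem.List.pyGetD arr i []) j ""

-- dist[i][j] read / write (indices are guarded to be in range at every use site)
def get2 (g : List (List Int)) (i j : Int) : Int :=
  PySem.List.pyGetD (PySem.List.pyGetD g i []) j (-2)

def set2 (g : List (List Int)) (i j v : Int) : List (List Int) :=
  PySem.List.pySetD g i (PySem.List.pySetD (PySem.List.pyGetD g i []) j v)

def dxL : List Int := [-1, 1, 0, 0]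
def dyL : List Int := [0, 0, -1, 1]

-- the two initialisation loops: dist[i][j] = 0 and queue.append([i,j]) at every 'W'
def bfsInit (arr : List (List String)) (N M : Int) :
    List (List Int) × List (Int × Int) :=
  (PySem.List.pyRange 0 N 1).foldl (fun st i =>
    (PySem.List.pyRange 0 M 1).foldl (fun st j =>
      if cellStr arr i j = "W" then (set2 st.1 i j 0, st.2 ++ [(i, j)])
      else st) st)
    ((PySem.List.pyRange 0 N 1).map (fun _ => List.replicate M.toNat (-1 : Int)), [])

-- the while loop (fuel is only a totality guard; the proof shows it is never exhausted)
def bfsLoop (N M : Int) : Nat → List (List Int) × List (Int × Int) → List (List Int)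
  | 0, st => st.1
  | fuel + 1, (dist, q) =>
    match q with
    | [] => dist
    | (x, y) :: rest =>
      bfsLoop N M fuel
        ((PySem.List.pyRange 0 4 1).foldl
          (fun (st : List (List Int) × List (Int × Int)) d =>
            let nx := x + PySem.List.pyGetD dxL d 0
            let ny := y + PySem.List.pyGetD dyL d 0
            if 0 ≤ nx ∧ nx < N ∧ 0 ≤ ny ∧ ny < M ∧ get2 st.1 nx ny = -1 then
              (set2 st.1 nx ny (get2 st.1 x y + 1), st.2 ++ [(nx, ny)])
            else st)
          (dist, rest))

def bfs (arr : List (List String)) (N : Int) (M : Int) : List (List Int) :=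
  bfsLoop N M (6 * (N.toNat * M.toNat) + 1) (bfsInit arr N M)

-- ===== PORT B =====
-- ws = [(i, j) for i in range(N) for j in range(M) if arr[i][j] == 'W']
def wsList (arr : List (List String)) (N M : Int) : List (Int × Int) :=
  (PySem.List.pyRange 0 N 1).foldl (fun acc i =>
    (PySem.List.pyRange 0 M 1).foldl (fun acc j =>
      if cellStr arr i j = "W" then acc ++ [(i, j)] else acc) acc) []

-- min(abs(i - a) + abs(j - b) for a, b in ws)   (ws nonempty at every use site)
def cellB (ws : List (Int × Int)) (i j : Int) : Int :=
  (PySem.List.min? (ws.map (fun p => |i - p.1| + |j - p.2|)) (fun v => v)).getD (-1)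

def bfs_alt (arr : List (List String)) (N : Int) (M : Int) : List (List Int) :=
  let ws := wsList arr N M
  if ws = [] then
    (PySem.List.pyRange 0 N 1).map (fun _ => List.replicate M.toNat (-1 : Int))
  else
    (PySem.List.pyRange 0 N 1).map (fun i =>
      (PySem.List.pyRange 0 M 1).map (fun j => cellB ws i j))

-- ===== PRECONDITION & SPEC =====
-- Pre_bfs: exactly the inputs where Python A returns: A indexes arr[i][j] only when
-- 0 < N and 0 < M, and then every i < N, j < M must be in range; else A raises IndexError.
def Pre_bfs (arr : List (List String)) (N : Int) (M : Int) : Prop :=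
  0 < N → 0 < M →
    N ≤ (arr.length : Int) ∧ ∀ row ∈ arr.take N.toNat, M ≤ (row.length : Int)

instance (arr : List (List String)) (N : Int) (M : Int) : Decidable (Pre_bfs arr N M) := by
  unfold Pre_bfs; infer_instance

def pvWitness_bfs : List (List String) × Int × Int := ([["W", "."], ["x", "W"]], 2, 2)

def Spec_bfs (arr : List (List String)) (N : Int) (M : Int) (out : List (List Int)) : Prop := out = bfs_alt arr N M
instance (arr : List (List String)) (N : Int) (M : Int) (out : List (List Int)) : Decidable (Spec_bfs arr N M out) := by unfold Spec_bfs; infer_instance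

-- ===== CLAIM (what is proved, stated in full; the proofs are below) =====
def Claim_equal_bfs : Prop := ∀ (arr : List (List String)) (N : Int) (M : Int), Dom_bfs arr N M → Pre_bfs arr N M → Spec_bfs arr N M (bfs arr N M)

-- ===== LEMMAS AND PROOFS =====

-- in-grid predicate, the ideal grid of a point function, pointwise update, unassigned count
def inGrid (N M i j : Int) : Prop := 0 ≤ i ∧ i < N ∧ 0 ≤ j ∧ j < M

def gridOf (N M : Int) (f : Int → Int → Int) : List (List Int) :=
  (PySem.List.pyRange 0 N 1).map (fun i => (PySem.List.pyRange 0 M 1).map (fun j => f i j))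

def upd (f : Int → Int → Int) (x y v : Int) : Int → Int → Int :=
  fun i j => if i = x ∧ j = y then v else f i j

def updAll (f : Int → Int → Int) (ps : List (Int × Int)) (v : Int) : Int → Int → Int :=
  ps.foldl (fun g p => upd g p.1 p.2 v) f

def U (N M : Int) (f : Int → Int → Int) : Nat :=
  ((PySem.List.pyRange 0 N 1).map (fun i =>
    ((PySem.List.pyRange 0 M 1).filter (fun j => decide (f i j = -1))).length)).sum

def nbrs (x y : Int) : List (Int × Int) := [(x - 1, y), (x + 1, y), (x, y - 1), (x, y + 1)]

-- the BFS invariant, phrased on the point function and the queue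
def BInv (ws : List (Int × Int)) (N M : Int) (f : Int → Int → Int) (q : List (Int × Int)) : Prop :=
  (∀ i j, inGrid N M i j → f i j ≠ -1 → f i j = cellB ws i j) ∧
  (∀ p ∈ q, inGrid N M p.1 p.2 ∧ f p.1 p.2 = cellB ws p.1 p.2) ∧
  List.Pairwise (fun p p' => cellB ws p.1 p.2 ≤ cellB ws p'.1 p'.2) q ∧
  (∀ p0, q.head? = some p0 → ∀ p ∈ q, cellB ws p.1 p.2 ≤ cellB ws p0.1 p0.2 + 1) ∧
  (∀ i j, inGrid N M i j → f i j ≠ -1 → (i, j) ∉ q →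
    ∀ p ∈ nbrs i j, inGrid N M p.1 p.2 → f p.1 p.2 ≠ -1) ∧
  (∀ p0, q.head? = some p0 → ∀ i j, inGrid N M i j →
    cellB ws i j ≤ cellB ws p0.1 p0.2 → f i j ≠ -1) ∧
  (∀ p ∈ ws, f p.1 p.2 ≠ -1)


def f0 (arr : List (List String)) : Int → Int → Int :=
  fun i j => if cellStr arr i j = "W" then 0 else -1

lemma map_pyRange_set {α : Type} (g : Int → α) (b : Int) (k : Nat) (v : α) :
    ((PySem.List.pyRange 0 b 1).map g).set k v
      = (PySem.List.pyRange 0 b 1).map (fun i => if i = (k : Int) then v else g i) := by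
  apply List.ext_getElem
  · simp
  · intro n h1 h2
    have hn : n < b.toNat := by
      have := h1; simpa [PySem.List.length_pyRange_one] using this
    have hr : ∀ (h : n < (PySem.List.pyRange 0 b 1).length),
        (PySem.List.pyRange 0 b 1)[n]'h = (n : Int) := by
      intro h; simp [PySem.List.getElem_pyRange_one]
    simp only [List.getElem_set, List.getElem_map, hr]
    split_ifs with h h2' h3
    · rfl
    · omega
    · simp at h3; omega
    · rfl

lemma get2_gridOf (N M : Int) (f : Int → Int → Int) (i j : Int) (h : inGrid N M i j) :
    get2 (gridOf N M f) i j = f i j := by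
  obtain ⟨h1, h2, h3, h4⟩ := h
  unfold get2 gridOf
  rw [PySem.List.pyGetD_map_pyRange_of_nonneg _ _ _ _ h1 h2,
      PySem.List.pyGetD_map_pyRange_of_nonneg _ _ _ _ h3 h4]

lemma set2_gridOf (N M : Int) (f : Int → Int → Int) (x y v : Int) (h : inGrid N M x y) :
    set2 (gridOf N M f) x y v = gridOf N M (upd f x y v) := by
  obtain ⟨h1, h2, h3, h4⟩ := h
  unfold set2 gridOf
  rw [PySem.List.pyGetD_map_pyRange_of_nonneg _ _ _ _ h1 h2,
      PySem.List.pySetD_of_nonneg _ _ h3,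
      PySem.List.pySetD_of_nonneg _ _ h1,
      map_pyRange_set, map_pyRange_set]
  apply List.map_congr_left
  intro i hi
  rw [PySem.List.mem_pyRange_one] at hi
  have hx : ((x.toNat : Int)) = x := Int.toNat_of_nonneg h1
  have hy : ((y.toNat : Int)) = y := Int.toNat_of_nonneg h3
  by_cases hix : i = x
  · subst hix
    simp only [hx]
    rw [if_pos trivial]
    apply List.map_congr_left
    intro j hj
    rw [PySem.List.mem_pyRange_one] at hj
    by_cases hjy : j = y
    · subst hjy; simp [hy, upd]
    · simp [hy, hjy, upd]
  · simp only [hx, if_neg hix]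
    apply List.map_congr_left
    intro j _
    simp [upd, hix]

lemma gridOf_congr (N M : Int) (f g : Int → Int → Int)
    (h : ∀ i j, inGrid N M i j → f i j = g i j) : gridOf N M f = gridOf N M g := by
  unfold gridOf
  apply List.map_congr_left
  intro i hi
  rw [PySem.List.mem_pyRange_one] at hi
  apply List.map_congr_left
  intro j hj
  rw [PySem.List.mem_pyRange_one] at hj
  exact h i j ⟨hi.1, hi.2, hj.1, hj.2⟩

lemma gridOf_neg_one (N M : Int) :
    (PySem.List.pyRange 0 N 1).map (fun _ => List.replicate M.toNat (-1 : Int))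
      = gridOf N M (fun _ _ => -1) := by
  unfold gridOf
  apply List.map_congr_left
  intro i _
  rw [show (fun (_ : Int) (_ : Int) => (-1 : Int)) i = Function.const Int (-1 : Int) from rfl,
      List.map_const, PySem.List.length_pyRange_one]
  simp

lemma foldl_pair_split {α β ι : Type} (step : α × β → ι → α × β)
    (s1 : α → ι → α) (s2 : β → ι → β)
    (h : ∀ s x, step s x = (s1 s.1 x, s2 s.2 x)) :
    ∀ (l : List ι) (st : α × β), l.foldl step st = (l.foldl s1 st.1, l.foldl s2 st.2) := by
  intro l
  induction l with
  | nil => intro st; rfl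
  | cons x xs ih => intro st; simp only [List.foldl_cons, h]; exact ih _

lemma wsList_eq (arr : List (List String)) (N M : Int) :
    wsList arr N M = (PySem.List.pyRange 0 N 1).flatMap (fun i =>
      ((PySem.List.pyRange 0 M 1).filter (fun j => decide (cellStr arr i j = "W"))).map
        (fun j => (i, j))) := by
  unfold wsList
  have hin : ∀ (i : Int) (acc : List (Int × Int)),
      (PySem.List.pyRange 0 M 1).foldl
        (fun acc j => if cellStr arr i j = "W" then acc ++ [(i, j)] else acc) acc
      = acc ++ ((PySem.List.pyRange 0 M 1).filter
          (fun j => decide (cellStr arr i j = "W"))).map (fun j => (i, j)) := by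
    intro i acc
    have := PySem.List.foldl_append_if (fun j => decide (cellStr arr i j = "W"))
      (fun j => ((i : Int), j)) (PySem.List.pyRange 0 M 1) acc
    simpa using this
  have hstep : (fun (acc : List (Int × Int)) (i : Int) =>
      (PySem.List.pyRange 0 M 1).foldl
        (fun acc j => if cellStr arr i j = "W" then acc ++ [(i, j)] else acc) acc)
      = (fun acc i => acc ++ ((PySem.List.pyRange 0 M 1).filter
          (fun j => decide (cellStr arr i j = "W"))).map (fun j => (i, j))) := by
    funext acc i; exact hin i acc
  rw [hstep, PySem.List.foldl_append_eq_flatMap]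
  rfl

lemma mem_wsList (arr : List (List String)) (N M : Int) (p : Int × Int) :
    p ∈ wsList arr N M ↔ inGrid N M p.1 p.2 ∧ cellStr arr p.1 p.2 = "W" := by
  rw [wsList_eq]
  simp only [List.mem_flatMap, List.mem_map, List.mem_filter,
    PySem.List.mem_pyRange_one, decide_eq_true_eq]
  constructor
  · rintro ⟨i, hi, j, ⟨hj, hw⟩, rfl⟩
    exact ⟨⟨hi.1, hi.2, hj.1, hj.2⟩, hw⟩
  · rintro ⟨⟨h1, h2, h3, h4⟩, hw⟩
    exact ⟨p.1, ⟨h1, h2⟩, p.2, ⟨⟨h3, h4⟩, hw⟩, rfl⟩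

lemma wsList_length_le (arr : List (List String)) (N M : Int) :
    (wsList arr N M).length ≤ N.toNat * M.toNat := by
  rw [wsList_eq, List.length_flatMap]
  have h1 : ∀ x ∈ (PySem.List.pyRange 0 N 1).map (fun i =>
      (((PySem.List.pyRange 0 M 1).filter
        (fun j => decide (cellStr arr i j = "W"))).map (fun j => ((i : Int), j))).length),
      x ≤ M.toNat := by
    intro x hx
    simp only [List.mem_map] at hx
    obtain ⟨i, _, rfl⟩ := hx
    calc _ ≤ (PySem.List.pyRange 0 M 1).length := by
            simp only [List.length_map]; exact List.length_filter_le _ _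
      _ = M.toNat := by rw [PySem.List.length_pyRange_one]; omega
  calc _ ≤ ((PySem.List.pyRange 0 N 1).map _).length * M.toNat :=
        List.sum_le_card_nsmul _ _ h1
    _ = N.toNat * M.toNat := by
        rw [List.length_map, PySem.List.length_pyRange_one]; congr 1; omega

lemma init_fst_inner (arr : List (List String)) (N M : Int) (i : Int)
    (hi : 0 ≤ i ∧ i < N) :
    ∀ (js : List Int) (g : Int → Int → Int), (∀ j ∈ js, 0 ≤ j ∧ j < M) →
    js.foldl (fun d j => if cellStr arr i j = "W" then set2 d i j 0 else d) (gridOf N M g)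
      = gridOf N M (fun a b => if a = i ∧ b ∈ js ∧ cellStr arr a b = "W" then 0 else g a b) := by
  intro js
  induction js with
  | nil =>
    intro g _
    simp only [List.foldl_nil]
    apply gridOf_congr; intro a b _; simp
  | cons j js ih =>
    intro g hb
    have hj : 0 ≤ j ∧ j < M := hb j (List.mem_cons_self ..)
    simp only [List.foldl_cons]
    by_cases hw : cellStr arr i j = "W"
    · rw [if_pos hw, set2_gridOf N M g i j 0 ⟨hi.1, hi.2, hj.1, hj.2⟩,
        ih _ (fun x hx => hb x (List.mem_cons_of_mem _ hx))]
      congr 1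
      funext a b
      by_cases hai : a = i
      · subst hai
        by_cases hbj : b = j
        · subst hbj
          simp [upd, hw]
        · simp only [upd, List.mem_cons]
          by_cases hbs : b ∈ js <;> simp [hbs, hbj]
      · simp [upd, hai]
    · rw [if_neg hw, ih _ (fun x hx => hb x (List.mem_cons_of_mem _ hx))]
      congr 1
      funext a b
      by_cases hai : a = i
      · subst hai
        by_cases hbj : b = j
        · subst hbj; simp [hw]
        · simp only [List.mem_cons]
          by_cases hbs : b ∈ js <;> simp [hbs, hbj]
      · simp [hai]

lemma init_fst (arr : List (List String)) (N M : Int) :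
    ∀ (is : List Int) (g : Int → Int → Int), (∀ i ∈ is, 0 ≤ i ∧ i < N) →
    is.foldl (fun d i => (PySem.List.pyRange 0 M 1).foldl
        (fun d j => if cellStr arr i j = "W" then set2 d i j 0 else d) d) (gridOf N M g)
      = gridOf N M (fun a b =>
          if a ∈ is ∧ (0 ≤ b ∧ b < M) ∧ cellStr arr a b = "W" then 0 else g a b) := by
  intro is
  induction is with
  | nil =>
    intro g _
    simp only [List.foldl_nil]
    apply gridOf_congr; intro a b _; simp
  | cons i is ih =>
    intro g ha
    have hi : 0 ≤ i ∧ i < N := ha i (List.mem_cons_self ..)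
    simp only [List.foldl_cons]
    rw [init_fst_inner arr N M i hi _ g (fun j hj => (PySem.List.mem_pyRange_one).1 hj),
      ih _ (fun x hx => ha x (List.mem_cons_of_mem _ hx))]
    congr 1
    funext a b
    by_cases hw : cellStr arr a b = "W"
    · by_cases hbm : 0 ≤ b ∧ b < M
      · have hbr : b ∈ PySem.List.pyRange 0 M 1 := (PySem.List.mem_pyRange_one).2 hbm
        by_cases hai : a = i
        · subst hai; simp [List.mem_cons, hbm, hw, hbr]
        · by_cases has : a ∈ is <;> simp [List.mem_cons, hbm, hw, hbr, hai, has]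
      · have hbr : b ∉ PySem.List.pyRange 0 M 1 := by
          rw [PySem.List.mem_pyRange_one]; exact hbm
        simp [hbm, hbr]
    · simp [hw]

lemma bfsInit_eq (arr : List (List String)) (N M : Int) :
    bfsInit arr N M = (gridOf N M (f0 arr), wsList arr N M) := by
  unfold bfsInit
  rw [foldl_pair_split _
    (fun d i => (PySem.List.pyRange 0 M 1).foldl
      (fun d j => if cellStr arr i j = "W" then set2 d i j 0 else d) d)
    (fun q i => (PySem.List.pyRange 0 M 1).foldl
      (fun q j => if cellStr arr i j = "W" then q ++ [(i, j)] else q) q)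
    (by
      intro s x
      rw [foldl_pair_split _
        (fun d j => if cellStr arr x j = "W" then set2 d x j 0 else d)
        (fun q j => if cellStr arr x j = "W" then q ++ [(x, j)] else q)
        (by intro s j; cases s; by_cases h : cellStr arr x j = "W" <;> simp [h])])]
  rw [Prod.mk.injEq]
  constructor
  · rw [gridOf_neg_one, init_fst arr N M _ _
      (fun i hi => (PySem.List.mem_pyRange_one).1 hi)]
    apply gridOf_congr
    intro a b hg
    have : a ∈ PySem.List.pyRange 0 N 1 := (PySem.List.mem_pyRange_one).2 ⟨hg.1, hg.2.1⟩
    unfold f0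
    by_cases hw : cellStr arr a b = "W" <;>
      simp [this, hg.2.2.1, hg.2.2.2, hw]
  · rfl


lemma cellB_le (ws : List (Int × Int)) (i j : Int) (p : Int × Int) (hp : p ∈ ws) :
    cellB ws i j ≤ |i - p.1| + |j - p.2| := by
  unfold cellB
  set xs := ws.map (fun p => |i - p.1| + |j - p.2|) with hxs
  have hne : xs ≠ [] := by
    simp [hxs]; intro h; subst h; simp at hp
  obtain ⟨m, hm⟩ : ∃ m, PySem.List.min? xs (fun v => v) = some m := by
    cases h : PySem.List.min? xs (fun v => v) with
    | none => exact absurd ((PySem.List.min?_eq_none_iff _ _).1 h) hne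
    | some m => exact ⟨m, rfl⟩
  rw [hm]
  exact PySem.List.min?_isMin hm _ (by exact List.mem_map_of_mem hp)

lemma cellB_attained (ws : List (Int × Int)) (i j : Int) (hne : ws ≠ []) :
    ∃ p ∈ ws, cellB ws i j = |i - p.1| + |j - p.2| := by
  unfold cellB
  set xs := ws.map (fun p => |i - p.1| + |j - p.2|) with hxs
  obtain ⟨m, hm⟩ : ∃ m, PySem.List.min? xs (fun v => v) = some m := by
    cases h : PySem.List.min? xs (fun v => v) with
    | none =>
      have := (PySem.List.min?_eq_none_iff _ _).1 h
      simp [hxs] at this; exact absurd this hne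
    | some m => exact ⟨m, rfl⟩
  have hmem := PySem.List.min?_mem hm
  rw [hxs] at hmem
  obtain ⟨p, hp, hpm⟩ := List.mem_map.1 hmem
  exact ⟨p, hp, by rw [hm, ← hpm]; rfl⟩

lemma cellB_nonneg (ws : List (Int × Int)) (i j : Int) (hne : ws ≠ []) :
    0 ≤ cellB ws i j := by
  obtain ⟨p, _, hp⟩ := cellB_attained ws i j hne
  rw [hp]
  have := abs_nonneg (i - p.1); have := abs_nonneg (j - p.2); omega

lemma cellB_lip (ws : List (Int × Int)) (i j i' j' : Int) (hne : ws ≠ []) :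
    cellB ws i' j' ≤ cellB ws i j + (|i - i'| + |j - j'|) := by
  obtain ⟨p, hp, hv⟩ := cellB_attained ws i j hne
  have h1 := cellB_le ws i' j' p hp
  have h2 : |i' - p.1| ≤ |i - p.1| + |i - i'| := by
    have := abs_sub (i - p.1) (i - i'); simp only [sub_sub_sub_cancel_left] at this
    calc |i' - p.1| = |(i - p.1) - (i - i')| := by ring_nf
      _ ≤ |i - p.1| + |i - i'| := abs_sub _ _
  have h3 : |j' - p.2| ≤ |j - p.2| + |j - j'| := by
    calc |j' - p.2| = |(j - p.2) - (j - j')| := by ring_nf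
      _ ≤ |j - p.2| + |j - j'| := abs_sub _ _
  omega

lemma cellB_pred (ws : List (Int × Int)) (N M : Int)
    (hg : ∀ p ∈ ws, inGrid N M p.1 p.2) (hne : ws ≠ []) (i j : Int)
    (hij : inGrid N M i j) (h1 : 1 ≤ cellB ws i j) :
    ∃ q ∈ nbrs i j, inGrid N M q.1 q.2 ∧ cellB ws q.1 q.2 = cellB ws i j - 1 := by
  obtain ⟨p, hp, hv⟩ := cellB_attained ws i j hne
  obtain ⟨ha1, ha2, hb1, hb2⟩ := hg p hp
  obtain ⟨hi1, hi2, hj1, hj2⟩ := hij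
  have key : ∀ i' j', (i', j') ∈ nbrs i j → |i - i'| + |j - j'| = 1 →
      |i' - p.1| + |j' - p.2| = cellB ws i j - 1 →
      inGrid N M i' j' → ∃ q ∈ nbrs i j, inGrid N M q.1 q.2 ∧
        cellB ws q.1 q.2 = cellB ws i j - 1 := by
    intro i' j' hmem hdist hval hgrid
    refine ⟨(i', j'), hmem, hgrid, ?_⟩
    show cellB ws i' j' = cellB ws i j - 1
    refine le_antisymm ?_ ?_
    · calc cellB ws i' j' ≤ |i' - p.1| + |j' - p.2| := cellB_le ws i' j' p hp
        _ = cellB ws i j - 1 := hval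
    · have := cellB_lip ws i' j' i j hne
      rw [abs_sub_comm i' i, abs_sub_comm j' j] at this
      omega
  rcases lt_trichotomy p.1 i with hlt | heq | hgt
  · refine key (i - 1) j ?_ ?_ ?_ ⟨by omega, by omega, hj1, hj2⟩
    · simp [nbrs]
    · rw [show i - (i - 1) = (1 : Int) by ring, show j - j = (0 : Int) by ring]; simp
    · rw [hv]
      have e1 : |i - 1 - p.1| = |i - p.1| - 1 := by
        rw [abs_of_nonneg (by omega), abs_of_nonneg (by omega)]; omega
      omega
  · rcases lt_trichotomy p.2 j with hlt' | heq' | hgt'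
    · refine key i (j - 1) ?_ ?_ ?_ ⟨hi1, hi2, by omega, by omega⟩
      · simp [nbrs]
      · rw [show i - i = (0 : Int) by ring, show j - (j - 1) = (1 : Int) by ring]; simp
      · rw [hv]
        have e1 : |j - 1 - p.2| = |j - p.2| - 1 := by
          rw [abs_of_nonneg (by omega), abs_of_nonneg (by omega)]; omega
        omega
    · exfalso
      rw [hv, heq, heq'] at h1; simp at h1
    · refine key i (j + 1) ?_ ?_ ?_ ⟨hi1, hi2, by omega, by omega⟩
      · simp [nbrs]
      · rw [show i - i = (0 : Int) by ring, show j - (j + 1) = (-1 : Int) by ring]; simp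
      · rw [hv]
        have e1 : |j + 1 - p.2| = |j - p.2| - 1 := by
          rw [abs_of_nonpos (by omega), abs_of_nonpos (by omega)]; omega
        omega
  · refine key (i + 1) j ?_ ?_ ?_ ⟨by omega, by omega, hj1, hj2⟩
    · simp [nbrs]
    · rw [show i - (i + 1) = (-1 : Int) by ring, show j - j = (0 : Int) by ring]; simp
    · rw [hv]
      have e1 : |i + 1 - p.1| = |i - p.1| - 1 := by
        rw [abs_of_nonpos (by omega), abs_of_nonpos (by omega)]; omega
      omega

lemma cellB_zero_mem (ws : List (Int × Int)) (i j : Int) (hne : ws ≠ [])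
    (h : cellB ws i j = 0) : (i, j) ∈ ws := by
  obtain ⟨p, hp, hv⟩ := cellB_attained ws i j hne
  rw [h] at hv
  have h1 := abs_nonneg (i - p.1); have h2 := abs_nonneg (j - p.2)
  have e1 : i = p.1 := by
    have : |i - p.1| = 0 := by omega
    have := abs_eq_zero.1 this; omega
  have e2 : j = p.2 := by
    have : |j - p.2| = 0 := by omega
    have := abs_eq_zero.1 this; omega
  rw [e1, e2]; exact hp

lemma cellB_mem_zero (ws : List (Int × Int)) (p : Int × Int) (hp : p ∈ ws) (hne : ws ≠ []) :
    cellB ws p.1 p.2 = 0 := by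
  have h1 := cellB_le ws p.1 p.2 p hp
  have h2 := cellB_nonneg ws p.1 p.2 hne
  simp at h1; omega


lemma updAll_eq (f : Int → Int → Int) (ps : List (Int × Int)) (v i j : Int) :
    updAll f ps v i j = if (i, j) ∈ ps then v else f i j := by
  induction ps generalizing f with
  | nil => simp [updAll]
  | cons p ps ih =>
    show updAll (upd f p.1 p.2 v) ps v i j = _
    rw [ih]
    by_cases hm : (i, j) ∈ ps
    · simp [hm]
    · by_cases hp : (i, j) = p
      · have : i = p.1 ∧ j = p.2 := Prod.ext_iff.1 hp
        simp [upd, this]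
      · have : ¬ (i = p.1 ∧ j = p.2) := by
          intro ⟨h1, h2⟩; exact hp (by rw [h1, h2])
        simp [hm, hp, upd, this]

lemma center_not_mem_nbrs (x y : Int) : (x, y) ∉ nbrs x y := by
  simp only [nbrs, List.mem_cons, List.not_mem_nil, or_false, Prod.mk.injEq]
  omega

lemma nbrs_nodup (x y : Int) : (nbrs x y).Nodup := by
  simp [nbrs, Prod.ext_iff]
  omega

lemma U_upd (N M x y v : Int) (f : Int → Int → Int) (h : inGrid N M x y)
    (h0 : f x y = -1) (hv : v ≠ -1) : U N M (upd f x y v) + 1 = U N M f := by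
  obtain ⟨hx1, hx2, hy1, hy2⟩ := h
  unfold U
  rw [PySem.List.pyRange_one_append 0 x N hx1 (by omega),
    PySem.List.pyRange_one_cons (show x < N by omega)]
  simp only [List.map_append, List.map_cons, List.sum_append, List.sum_cons]
  have hseg : ∀ (l : List Int), (∀ i ∈ l, i ≠ x) →
      l.map (fun i => ((PySem.List.pyRange 0 M 1).filter
          (fun j => decide (upd f x y v i j = -1))).length)
      = l.map (fun i => ((PySem.List.pyRange 0 M 1).filter
          (fun j => decide (f i j = -1))).length) := by
    intro l hl
    apply List.map_congr_left
    intro i hi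
    congr 1
    apply List.filter_congr
    intro j _
    have : ¬ (i = x ∧ j = y) := by
      intro ⟨h1, _⟩; exact hl i hi h1
    simp [upd, this]
  rw [hseg _ (fun i hi => by have := (PySem.List.mem_pyRange_one).1 hi; omega),
      hseg _ (fun i hi => by have := (PySem.List.mem_pyRange_one).1 hi; omega)]
  have hrow : ((PySem.List.pyRange 0 M 1).filter
      (fun j => decide (upd f x y v x j = -1))).length + 1
      = ((PySem.List.pyRange 0 M 1).filter (fun j => decide (f x j = -1))).length := by
    rw [PySem.List.pyRange_one_append 0 y M hy1 (by omega),
      PySem.List.pyRange_one_cons (show y < M by omega)]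
    simp only [List.filter_append, List.filter_cons, List.length_append]
    have e1 : decide (upd f x y v x y = -1) = false := by simp [upd, hv]
    have e2 : decide (f x y = -1) = true := by simp [h0]
    rw [e1, e2]
    have hseg2 : ∀ (l : List Int), (∀ j ∈ l, j ≠ y) →
        l.filter (fun j => decide (upd f x y v x j = -1))
        = l.filter (fun j => decide (f x j = -1)) := by
      intro l hl
      apply List.filter_congr
      intro j hj
      have hjy : j ≠ y := hl j hj
      simp [upd, hjy]
    rw [hseg2 _ (fun j hj => by have := (PySem.List.mem_pyRange_one).1 hj; omega),
        hseg2 _ (fun j hj => by have := (PySem.List.mem_pyRange_one).1 hj; omega)]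
    norm_num
    omega
  omega

lemma U_updAll (N M v : Int) (ps : List (Int × Int)) (f : Int → Int → Int)
    (h : ∀ p ∈ ps, inGrid N M p.1 p.2 ∧ f p.1 p.2 = -1) (hnd : ps.Nodup) (hv : v ≠ -1) :
    U N M (updAll f ps v) + ps.length = U N M f := by
  induction ps generalizing f with
  | nil => simp [updAll]
  | cons p ps ih =>
    have hp := h p (List.mem_cons_self ..)
    have hstep := U_upd N M p.1 p.2 v f hp.1 hp.2 hv
    have hrec := ih (upd f p.1 p.2 v)
      (fun q hq => by
        have hqp : q ≠ p := by
          intro hqe; subst hqe; exact (List.nodup_cons.1 hnd).1 hq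
        have : ¬ (q.1 = p.1 ∧ q.2 = p.2) := by
          intro ⟨h1, h2⟩; exact hqp (Prod.ext h1 h2)
        refine ⟨(h q (List.mem_cons_of_mem _ hq)).1, ?_⟩
        simp only [upd, if_neg this]
        exact (h q (List.mem_cons_of_mem _ hq)).2)
      (List.nodup_cons.1 hnd).2
    show U N M (updAll (upd f p.1 p.2 v) ps v) + (ps.length + 1) = U N M f
    omega

lemma U_le (N M : Int) (f : Int → Int → Int) : U N M f ≤ N.toNat * M.toNat := by
  unfold U
  have h1 : ∀ x ∈ (PySem.List.pyRange 0 N 1).map (fun i =>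
      ((PySem.List.pyRange 0 M 1).filter (fun j => decide (f i j = -1))).length),
      x ≤ M.toNat := by
    intro x hx
    simp only [List.mem_map] at hx
    obtain ⟨i, _, rfl⟩ := hx
    calc _ ≤ (PySem.List.pyRange 0 M 1).length := List.length_filter_le _ _
      _ = M.toNat := by rw [PySem.List.length_pyRange_one]; congr 1; omega
  calc _ ≤ ((PySem.List.pyRange 0 N 1).map _).length * M.toNat :=
        List.sum_le_card_nsmul _ _ h1
    _ = N.toNat * M.toNat := by
        rw [List.length_map, PySem.List.length_pyRange_one]; congr 1; omega

def newsOf (N M : Int) (f : Int → Int → Int) (cands : List (Int × Int)) : List (Int × Int) :=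
  cands.filter (fun p =>
    decide (0 ≤ p.1 ∧ p.1 < N ∧ 0 ≤ p.2 ∧ p.2 < M) && decide (f p.1 p.2 = -1))

lemma proc_char (N M x y : Int) (hxy : inGrid N M x y) :
    ∀ (cands : List (Int × Int)) (f : Int → Int → Int) (rest : List (Int × Int)),
    cands.Nodup → (x, y) ∉ cands →
    cands.foldl (fun (st : List (List Int) × List (Int × Int)) p =>
        if 0 ≤ p.1 ∧ p.1 < N ∧ 0 ≤ p.2 ∧ p.2 < M ∧ get2 st.1 p.1 p.2 = -1 then
          (set2 st.1 p.1 p.2 (get2 st.1 x y + 1), st.2 ++ [p])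
        else st) (gridOf N M f, rest)
    = (gridOf N M (updAll f (newsOf N M f cands) (f x y + 1)),
       rest ++ newsOf N M f cands) := by
  intro cands
  induction cands with
  | nil => intro f rest _ _; simp [newsOf, updAll]
  | cons p cands ih =>
    intro f rest hnd hc
    have hpxy : p ≠ (x, y) := by
      intro h; subst h; exact hc (List.mem_cons_self ..)
    simp only [List.foldl_cons]
    by_cases hb : inGrid N M p.1 p.2
    · rw [get2_gridOf N M f p.1 p.2 hb]
      by_cases hf : f p.1 p.2 = -1
      · rw [if_pos ⟨hb.1, hb.2.1, hb.2.2.1, hb.2.2.2, hf⟩,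
          get2_gridOf N M f x y hxy, set2_gridOf N M f p.1 p.2 _ hb]
        rw [ih (upd f p.1 p.2 (f x y + 1)) (rest ++ [p])
          (List.nodup_cons.1 hnd).2 (fun hm => hc (List.mem_cons_of_mem _ hm))]
        have hnews : newsOf N M (upd f p.1 p.2 (f x y + 1)) cands = newsOf N M f cands := by
          unfold newsOf
          apply List.filter_congr
          intro q hq
          have hqp : ¬ (q.1 = p.1 ∧ q.2 = p.2) := by
            intro ⟨h1, h2⟩
            exact (List.nodup_cons.1 hnd).1 (((Prod.ext_iff).2 ⟨h1, h2⟩ : q = p) ▸ hq)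
          simp [upd, hqp]
        have hv' : upd f p.1 p.2 (f x y + 1) x y = f x y := by
          have : ¬ (x = p.1 ∧ y = p.2) := by
            intro ⟨h1, h2⟩; exact hpxy (by cases p; simp_all)
          simp [upd, this]
        have hcons : newsOf N M f (p :: cands) = p :: newsOf N M f cands := by
          unfold newsOf
          rw [List.filter_cons,
            if_pos (by simp [hf, hb.1, hb.2.1, hb.2.2.1, hb.2.2.2])]
        rw [hnews, hv', hcons, Prod.mk.injEq]
        constructor
        · rfl
        · simp
      · rw [if_neg (by intro h; exact hf h.2.2.2.2)]
        have hcons : newsOf N M f (p :: cands) = newsOf N M f cands := by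
          unfold newsOf
          rw [List.filter_cons, if_neg (by simp [hf])]
        rw [hcons]
        exact ih f rest (List.nodup_cons.1 hnd).2 (fun hm => hc (List.mem_cons_of_mem _ hm))
    · have hcond : ¬ (0 ≤ p.1 ∧ p.1 < N ∧ 0 ≤ p.2 ∧ p.2 < M ∧ get2 (gridOf N M f) p.1 p.2 = -1) := by
        intro ⟨h1, h2, h3, h4, _⟩; exact hb ⟨h1, h2, h3, h4⟩
      rw [if_neg hcond]
      have hcons : newsOf N M f (p :: cands) = newsOf N M f cands := by
        unfold newsOf
        rw [List.filter_cons, if_neg (by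
          simp only [Bool.and_eq_true, decide_eq_true_eq]
          rintro ⟨⟨h1, h2, h3, h4⟩, -⟩
          exact hb ⟨h1, h2, h3, h4⟩)]
      rw [hcons]
      exact ih f rest (List.nodup_cons.1 hnd).2 (fun hm => hc (List.mem_cons_of_mem _ hm))


lemma step_char (N M x y : Int) (f : Int → Int → Int) (rest : List (Int × Int))
    (hxy : inGrid N M x y) :
    (PySem.List.pyRange 0 4 1).foldl
      (fun (st : List (List Int) × List (Int × Int)) d =>
        let nx := x + PySem.List.pyGetD dxL d 0
        let ny := y + PySem.List.pyGetD dyL d 0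
        if 0 ≤ nx ∧ nx < N ∧ 0 ≤ ny ∧ ny < M ∧ get2 st.1 nx ny = -1 then
          (set2 st.1 nx ny (get2 st.1 x y + 1), st.2 ++ [(nx, ny)])
        else st)
      (gridOf N M f, rest)
    = (gridOf N M (updAll f (newsOf N M f (nbrs x y)) (f x y + 1)),
       rest ++ newsOf N M f (nbrs x y)) := by
  have h4 : PySem.List.pyRange 0 4 1 = [0, 1, 2, 3] := by decide
  have hproc := proc_char N M x y hxy (nbrs x y) f rest (nbrs_nodup x y)
    (center_not_mem_nbrs x y)
  rw [h4]
  rw [show (nbrs x y) = [(x - 1, y), (x + 1, y), (x, y - 1), (x, y + 1)] from rfl] at hproc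
  simp only [List.foldl_cons, List.foldl_nil] at hproc ⊢
  have e0 : PySem.List.pyGetD dxL 0 0 = -1 := by decide
  have e1 : PySem.List.pyGetD dxL 1 0 = 1 := by decide
  have e2 : PySem.List.pyGetD dxL 2 0 = 0 := by decide
  have e3 : PySem.List.pyGetD dxL 3 0 = 0 := by decide
  have g0 : PySem.List.pyGetD dyL 0 0 = 0 := by decide
  have g1 : PySem.List.pyGetD dyL 1 0 = 0 := by decide
  have g2 : PySem.List.pyGetD dyL 2 0 = -1 := by decide
  have g3 : PySem.List.pyGetD dyL 3 0 = 1 := by decide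
  simp only [e0, e1, e2, e3, g0, g1, g2, g3]
  have a1 : x + (-1 : Int) = x - 1 := by ring
  have a2 : y + (0 : Int) = y := by ring
  have a3 : x + (0 : Int) = x := by ring
  have a4 : y + (-1 : Int) = y - 1 := by ring
  simp only [a1, a2, a3, a4]
  exact hproc

lemma nbrs_dist (x y : Int) (p : Int × Int) (h : p ∈ nbrs x y) :
    |x - p.1| + |y - p.2| = 1 := by
  simp only [nbrs, List.mem_cons, List.not_mem_nil, or_false] at h
  rcases h with h | h | h | h <;> subst h <;> simp

lemma nbrs_symm (x y : Int) (p : Int × Int) (h : p ∈ nbrs x y) :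
    (x, y) ∈ nbrs p.1 p.2 := by
  simp only [nbrs, List.mem_cons, List.not_mem_nil, or_false] at h ⊢
  rcases h with h | h | h | h <;> subst h <;> simp [Prod.ext_iff]

lemma mem_newsOf (N M : Int) (f : Int → Int → Int) (x y : Int) (p : Int × Int) :
    p ∈ newsOf N M f (nbrs x y) ↔
      p ∈ nbrs x y ∧ inGrid N M p.1 p.2 ∧ f p.1 p.2 = -1 := by
  unfold newsOf inGrid
  simp [List.mem_filter, and_assoc]

lemma inv_step (ws : List (Int × Int)) (N M : Int)
    (hg : ∀ p ∈ ws, inGrid N M p.1 p.2) (hne : ws ≠ [])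
    (f : Int → Int → Int) (x y : Int) (rest : List (Int × Int))
    (hinv : BInv ws N M f ((x, y) :: rest)) :
    BInv ws N M (updAll f (newsOf N M f (nbrs x y)) (f x y + 1))
      (rest ++ newsOf N M f (nbrs x y)) := by
  obtain ⟨hV, hQ, hS, hB, hC, hL, hW⟩ := hinv
  set news := newsOf N M f (nbrs x y) with hnewsdef
  obtain ⟨hxy, hfxy⟩ := hQ (x, y) (List.mem_cons_self ..)
  set v := cellB ws x y with hvdef
  have hv0 : 0 ≤ v := cellB_nonneg ws x y hne
  set g' := updAll f news (f x y + 1) with hg'def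
  have hchar : ∀ i j, g' i j = if (i, j) ∈ news then v + 1 else f i j := by
    intro i j; rw [hg'def, updAll_eq, hfxy]
  have hpres : ∀ i j, f i j ≠ -1 → g' i j ≠ -1 := by
    intro i j h; rw [hchar]; split_ifs with hm
    · omega
    · exact h
  have hnewsfact : ∀ p ∈ news, p ∈ nbrs x y ∧ inGrid N M p.1 p.2 ∧ f p.1 p.2 = -1 :=
    fun p hp => (mem_newsOf N M f x y p).1 hp
  have hrest_o : ∀ p ∈ rest, p ∈ (x, y) :: rest := fun p hp => List.mem_cons_of_mem _ hp
  have hqassigned : ∀ p ∈ rest, f p.1 p.2 ≠ -1 := by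
    intro p hp
    rw [(hQ p (hrest_o p hp)).2]
    have := cellB_nonneg ws p.1 p.2 hne; omega
  have hrest_news : ∀ p ∈ rest, p ∉ news := by
    intro p hp hm
    exact hqassigned p hp (hnewsfact p hm).2.2
  have hnews_cell : ∀ p ∈ news, cellB ws p.1 p.2 = v + 1 := by
    intro p hp
    obtain ⟨hnb, hgrid, hunass⟩ := hnewsfact p hp
    have hle : cellB ws p.1 p.2 ≤ v + 1 := by
      have := cellB_lip ws x y p.1 p.2 hne
      have hd := nbrs_dist x y p hnb
      omega
    have hge : ¬ cellB ws p.1 p.2 ≤ v := by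
      intro hc
      exact hL (x, y) rfl p.1 p.2 hgrid hc hunass
    omega
  have hg'news : ∀ p ∈ news, g' p.1 p.2 = v + 1 := by
    intro p hp; rw [hchar]; simp [hp]
  have hg'rest : ∀ p ∈ rest, g' p.1 p.2 = f p.1 p.2 := by
    intro p hp; rw [hchar, if_neg (by exact fun hm => hrest_news p hp hm)]
  have hspread : ∀ p ∈ rest, cellB ws p.1 p.2 ≤ v + 1 :=
    fun p hp => hB (x, y) rfl p (hrest_o p hp)
  have hsort : ∀ p ∈ rest, v ≤ cellB ws p.1 p.2 := by
    have := List.pairwise_cons.1 hS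
    exact fun p hp => this.1 p hp
  -- the new closedness, proved first since the level property uses it
  have hC' : ∀ i j, inGrid N M i j → g' i j ≠ -1 → (i, j) ∉ rest ++ news →
      ∀ p ∈ nbrs i j, inGrid N M p.1 p.2 → g' p.1 p.2 ≠ -1 := by
    intro i j hgrid hass hnq p hp hpgrid
    by_cases hcen : (i, j) = (x, y)
    · injection hcen with e1 e2
      subst e1; subst e2
      by_cases hfp : f p.1 p.2 = -1
      · have hmem : p ∈ news := (mem_newsOf N M f i j p).2 ⟨hp, hpgrid, hfp⟩
        rw [hchar p.1 p.2, if_pos hmem]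
        omega
      · exact hpres _ _ hfp
    · have hfij : f i j ≠ -1 := by
        intro h0
        have : (i, j) ∈ news ∨ g' i j = f i j := by
          rw [hchar]; split_ifs with hm
          · exact Or.inl hm
          · exact Or.inr rfl
        rcases this with hm | he
        · exact hnq (List.mem_append.2 (Or.inr hm))
        · rw [he] at hass; exact hass h0
      have hnold : (i, j) ∉ (x, y) :: rest := by
        intro hm
        rcases List.mem_cons.1 hm with h | h
        · exact hcen h
        · exact hnq (List.mem_append.2 (Or.inl h))
      exact hpres _ _ (hC i j hgrid hfij hnold p hp hpgrid)
  refine ⟨?_, ?_, ?_, ?_, hC', ?_, fun p hp => hpres _ _ (hW p hp)⟩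
  · -- values correct
    intro i j hgrid hass
    rw [hchar] at hass ⊢
    split_ifs at hass ⊢ with hm
    · exact (hnews_cell (i, j) hm).symm
    · exact hV i j hgrid hass
  · -- queue members assigned with correct values
    intro p hp
    rcases List.mem_append.1 hp with h | h
    · exact ⟨(hQ p (hrest_o p h)).1, by rw [hg'rest p h]; exact (hQ p (hrest_o p h)).2⟩
    · exact ⟨(hnewsfact p h).2.1, by rw [hg'news p h, hnews_cell p h]⟩
  · -- sortedness
    rw [List.pairwise_append]
    refine ⟨(List.pairwise_cons.1 hS).2, ?_, ?_⟩
    · apply List.pairwise_of_forall_mem_list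
      intro a ha b hb
      rw [hnews_cell a ha, hnews_cell b hb]
    · intro a ha b hb
      rw [hnews_cell b hb]
      have := hspread a ha; omega
  · -- bounded spread
    intro p0 hp0 p hp
    cases rest with
    | nil =>
      simp only [List.nil_append] at hp0 hp
      have h1 := hnews_cell p0 (by
        cases hnews : news with
        | nil => rw [hnews] at hp0; simp at hp0
        | cons a t =>
          have ha : a = p0 := by rw [hnews] at hp0; simpa using hp0
          simp only [← ha]
          exact List.mem_cons_self ..)
      have h2 := hnews_cell p hp
      omega
    | cons r0 rs =>
      have hp0' : p0 = r0 := by simp at hp0; exact hp0.symm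
      subst hp0'
      have hr0 : v ≤ cellB ws p0.1 p0.2 := hsort p0 (List.mem_cons_self ..)
      rcases List.mem_append.1 hp with h | h
      · have := hspread p h; omega
      · have := hnews_cell p h; omega
  · -- level property
    intro p0 hp0 i j hgrid hle
    have hp0v : cellB ws p0.1 p0.2 ≤ v + 1 := by
      cases rest with
      | nil =>
        simp only [List.nil_append] at hp0
        rcases hn : news with _ | ⟨a, t⟩
        · rw [hn] at hp0; simp at hp0
        · have ha : a = p0 := by rw [hn] at hp0; simpa using hp0
          have hmem : p0 ∈ news := by
            rw [hn, ← ha]; exact List.mem_cons_self ..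
          rw [hnews_cell p0 hmem]
      | cons r0 rs =>
        have : p0 = r0 := by simp at hp0; exact hp0.symm
        subst this
        exact hspread p0 (List.mem_cons_self ..)
    by_cases hcase : cellB ws i j ≤ v
    · exact hpres _ _ (hL (x, y) rfl i j hgrid hcase)
    · -- cellB i j = v + 1 here
      have hij1 : cellB ws i j = v + 1 := by omega
      have hpos : 1 ≤ cellB ws i j := by omega
      obtain ⟨q, hqn, hqgrid, hqval⟩ := cellB_pred ws N M hg hne i j hgrid hpos
      have hqv : cellB ws q.1 q.2 = v := by omega
      have hqass : f q.1 q.2 ≠ -1 := hL (x, y) rfl q.1 q.2 hqgrid (le_of_eq hqv)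
      have hqnotq : q ∉ rest ++ news := by
        intro hm
        rcases List.mem_append.1 hm with h | h
        · cases rest with
          | nil => simp at h
          | cons r0 rs =>
            have hp0r : p0 = r0 := by simp at hp0; exact hp0.symm
            subst hp0r
            have hr0v : v + 1 ≤ cellB ws p0.1 p0.2 := by omega
            have htail : List.Pairwise
                (fun p p' => cellB ws p.1 p.2 ≤ cellB ws p'.1 p'.2) (p0 :: rs) :=
              (List.pairwise_cons.1 hS).2
            rcases List.mem_cons.1 h with he | ht
            · subst he; omega
            · have := (List.pairwise_cons.1 htail).1 q ht; omega
        · exact hqass (hnewsfact q h).2.2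
      have := hC' q.1 q.2 hqgrid (hpres _ _ hqass) hqnotq
        (i, j) (nbrs_symm i j q hqn) hgrid
      exact this

lemma inv_final (ws : List (Int × Int)) (N M : Int)
    (hg : ∀ p ∈ ws, inGrid N M p.1 p.2) (hne : ws ≠ [])
    (f : Int → Int → Int) (hinv : BInv ws N M f []) :
    ∀ i j, inGrid N M i j → f i j = cellB ws i j := by
  obtain ⟨hV, _, _, _, hC, _, hW⟩ := hinv
  have hass : ∀ (k : Nat), ∀ i j, inGrid N M i j → (cellB ws i j).toNat = k →
      f i j ≠ -1 := by
    intro k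
    induction k using Nat.strong_induction_on with
    | _ k ih =>
      intro i j hgrid hk
      by_cases h0 : cellB ws i j = 0
      · exact hW _ (cellB_zero_mem ws i j hne h0)
      · have h1 : 1 ≤ cellB ws i j := by
          have := cellB_nonneg ws i j hne; omega
        obtain ⟨q, hqn, hqg, hqval⟩ := cellB_pred ws N M hg hne i j hgrid h1
        have hq0 : 0 ≤ cellB ws q.1 q.2 := cellB_nonneg ws q.1 q.2 hne
        have hqass : f q.1 q.2 ≠ -1 :=
          ih (cellB ws q.1 q.2).toNat (by omega) q.1 q.2 hqg rfl
        exact hC q.1 q.2 hqg hqass (List.not_mem_nil)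
          (i, j) (nbrs_symm i j q hqn) hgrid
  intro i j hgrid
  exact hV i j hgrid (hass (cellB ws i j).toNat i j hgrid rfl)

lemma inv_init (arr : List (List String)) (N M : Int)
    (hne : wsList arr N M ≠ []) :
    BInv (wsList arr N M) N M (f0 arr) (wsList arr N M) := by
  set ws := wsList arr N M with hws
  have hmem : ∀ p, p ∈ ws ↔ inGrid N M p.1 p.2 ∧ cellStr arr p.1 p.2 = "W" :=
    fun p => mem_wsList arr N M p
  have hf0 : ∀ i j, f0 arr i j ≠ -1 ↔ cellStr arr i j = "W" := by
    intro i j; unfold f0; split_ifs with h <;> simp [h]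
  have hf0val : ∀ i j, cellStr arr i j = "W" → f0 arr i j = 0 := by
    intro i j h; unfold f0; rw [if_pos h]
  refine ⟨?_, ?_, ?_, ?_, ?_, ?_, ?_⟩
  · intro i j hgrid hassn
    have hw := (hf0 i j).1 hassn
    have hm : (i, j) ∈ ws := (hmem (i, j)).2 ⟨hgrid, hw⟩
    rw [hf0val i j hw, cellB_mem_zero ws (i, j) hm hne]
  · intro p hp
    obtain ⟨hgrid, hw⟩ := (hmem p).1 hp
    exact ⟨hgrid, by rw [hf0val p.1 p.2 hw, cellB_mem_zero ws p hp hne]⟩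
  · apply List.pairwise_of_forall_mem_list
    intro a ha b hb
    rw [cellB_mem_zero ws a ha hne, cellB_mem_zero ws b hb hne]
  · intro p0 hp0 p hp
    have h0 := cellB_mem_zero ws p0 (List.mem_of_mem_head? hp0) hne
    have h1 := cellB_mem_zero ws p hp hne
    omega
  · intro i j hgrid hassn hnm p hp hpg
    have hw := (hf0 i j).1 hassn
    exact absurd ((hmem (i, j)).2 ⟨hgrid, hw⟩) hnm
  · intro p0 hp0 i j hgrid hle
    have h0 := cellB_mem_zero ws p0 (List.mem_of_mem_head? hp0) hne
    have h1 := cellB_nonneg ws i j hne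
    have h2 : cellB ws i j = 0 := by omega
    have hm := cellB_zero_mem ws i j hne h2
    exact (hf0 i j).2 ((hmem (i, j)).1 hm).2
  · intro p hp
    exact (hf0 p.1 p.2).2 ((hmem p).1 hp).2

lemma loop_main (ws : List (Int × Int)) (N M : Int)
    (hg : ∀ p ∈ ws, inGrid N M p.1 p.2) (hne : ws ≠ []) :
    ∀ (fuel : Nat) (f : Int → Int → Int) (q : List (Int × Int)),
    BInv ws N M f q → 5 * U N M f + q.length < fuel →
    bfsLoop N M fuel (gridOf N M f, q) = gridOf N M (fun i j => cellB ws i j) := by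
  intro fuel
  induction fuel with
  | zero => intro f q _ h; omega
  | succ fuel ih =>
    intro f q hinv hm
    cases q with
    | nil =>
      show gridOf N M f = _
      exact gridOf_congr N M _ _ (inv_final ws N M hg hne f hinv)
    | cons p rest =>
      obtain ⟨x, y⟩ := p
      have hxy : inGrid N M x y := (hinv.2.1 (x, y) (List.mem_cons_self ..)).1
      show bfsLoop N M fuel _ = _
      rw [step_char N M x y f rest hxy]
      have hnewsprops : ∀ p ∈ newsOf N M f (nbrs x y),
          inGrid N M p.1 p.2 ∧ f p.1 p.2 = -1 :=
        fun p hp => ((mem_newsOf N M f x y p).1 hp).2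
      have hnodup : (newsOf N M f (nbrs x y)).Nodup :=
        List.Nodup.filter _ (nbrs_nodup x y)
      have hv0 : 0 ≤ f x y := by
        rw [(hinv.2.1 (x, y) (List.mem_cons_self ..)).2]
        exact cellB_nonneg ws x y hne
      have hcount := U_updAll N M (f x y + 1) (newsOf N M f (nbrs x y)) f
        hnewsprops hnodup (by omega)
      apply ih
      · exact inv_step ws N M hg hne f x y rest hinv
      · simp only [List.length_append]
        simp only [List.length_cons] at hm
        omega
-- ===== VERDICT (by name: the statement is the Claim_ definition above) =====
theorem bfs_spec : Claim_equal_bfs := by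
  intro arr N M _ _
  unfold Spec_bfs bfs bfs_alt
  rw [bfsInit_eq arr N M]
  by_cases hws : wsList arr N M = []
  · rw [if_pos hws, hws]
    show gridOf N M (f0 arr) = _
    rw [gridOf_neg_one]
    apply gridOf_congr
    intro i j hgrid
    unfold f0
    split_ifs with hw
    · exact absurd ((mem_wsList arr N M (i, j)).2 ⟨hgrid, hw⟩) (by rw [hws]; simp)
    · rfl
  · rw [if_neg hws]
    have hg : ∀ p ∈ wsList arr N M, inGrid N M p.1 p.2 :=
      fun p hp => ((mem_wsList arr N M p).1 hp).1
    have hU := U_le N M (f0 arr)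
    have hlen := wsList_length_le arr N M
    exact loop_main (wsList arr N M) N M hg hws _ (f0 arr) (wsList arr N M)
      (inv_init arr N M hws) (by omega)
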